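-- pv_equiv track=rewrite | github.com/pypi-data/pypi-mirror-162 | packages/query-toolkits/query_toolkits-1.0.4-py3-none-any.whl/query_toolkits/extractor.py | _compare_res
-- ===== SOURCE A (Python) =====
-- def _compare_res(res1, res2):
--     win1, win2 = True, True
--     for elem1, elem2 in zip(res1, res2):
--         if elem1 is not None and elem2 is not None and elem1 != elem2:
--             return -1
--         if elem1 is None and elem2 is not None:
--             win1 = False
--         elif elem2 is None and elem1 is not None:
--             win2 = False
--     if win1:
--         return 1
--     if win2:
--         return 0
--     return -1
-- ===== SOURCE B (Python) =====
-- def _compare_res(res1, res2):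
--     pairs = list(zip(res1, res2))
--     if any(e1 is not None and e2 is not None and e1 != e2 for e1, e2 in pairs):
--         return -1
--     win1 = not any(e1 is None and e2 is not None for e1, e2 in pairs)
--     win2 = not any(e2 is None and e1 is not None for e1, e2 in pairs)
--     return 1 if win1 else (0 if win2 else -1)
-- ===== Notes on version B (the rewrite author's own statement) =====
-- stated objective: idiomatic
-- what changed: Replaced the single flag-maintaining loop with three independent declarative any-scans over the zipped pairs (conflict check, then the two dominance checks).
import Mathlib
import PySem

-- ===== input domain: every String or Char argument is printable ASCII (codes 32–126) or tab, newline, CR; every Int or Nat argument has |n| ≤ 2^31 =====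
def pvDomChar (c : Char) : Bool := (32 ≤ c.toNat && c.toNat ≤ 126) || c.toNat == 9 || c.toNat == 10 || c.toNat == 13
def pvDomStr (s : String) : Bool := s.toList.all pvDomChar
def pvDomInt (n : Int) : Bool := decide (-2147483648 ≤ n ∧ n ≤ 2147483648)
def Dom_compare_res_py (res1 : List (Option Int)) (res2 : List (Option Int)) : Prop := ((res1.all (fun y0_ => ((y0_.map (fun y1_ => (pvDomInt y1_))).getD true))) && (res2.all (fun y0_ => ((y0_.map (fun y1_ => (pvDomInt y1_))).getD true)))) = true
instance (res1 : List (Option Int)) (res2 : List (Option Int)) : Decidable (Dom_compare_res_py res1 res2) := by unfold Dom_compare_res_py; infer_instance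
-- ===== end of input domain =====

-- B replaces A's single flag-maintaining loop with three independent any-scans over the zipped pairs (idiomatic; same cost).
-- ===== PORT A =====
-- the for-loop over zip(res1,res2) with early return -1 and the win1/win2 flags
def compareLoopA : List (Option Int × Option Int) → Bool → Bool → Int
  | [], w1, w2 => if w1 = true then 1 else if w2 = true then 0 else -1
  | (e1, e2) :: rest, w1, w2 =>
    if e1.isSome && e2.isSome && e1 != e2 then -1
    else if e1 = none ∧ e2 ≠ none then compareLoopA rest false w2
    else if e2 = none ∧ e1 ≠ none then compareLoopA rest w1 false
    else compareLoopA rest w1 w2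

def compare_res_py (res1 : List (Option Int)) (res2 : List (Option Int)) : Int :=
  compareLoopA (res1.zip res2) true true

-- ===== PORT B =====
def compare_res_py_alt (res1 : List (Option Int)) (res2 : List (Option Int)) : Int :=
  let pairs := res1.zip res2
  if pairs.any (fun p => p.1.isSome && p.2.isSome && p.1 != p.2) then -1
  else
    let win1 := ! pairs.any (fun p => p.1 == none && p.2 != none)
    let win2 := ! pairs.any (fun p => p.2 == none && p.1 != none)
    if win1 then 1 else if win2 then 0 else -1

-- ===== PRECONDITION & SPEC =====
def Spec_compare_res_py (res1 : List (Option Int)) (res2 : List (Option Int)) (out : Int) : Prop := out = compare_res_py_alt res1 res2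
instance (res1 : List (Option Int)) (res2 : List (Option Int)) (out : Int) : Decidable (Spec_compare_res_py res1 res2 out) := by unfold Spec_compare_res_py; infer_instance

-- ===== CLAIM (what is proved, stated in full; the proofs are below) =====
def Claim_equal_compare_res_py : Prop := ∀ (res1 : List (Option Int)) (res2 : List (Option Int)), Dom_compare_res_py res1 res2 → Spec_compare_res_py res1 res2 (compare_res_py res1 res2)

-- ===== LEMMAS AND PROOFS =====
-- loop invariant: compareLoopA on any pair list and flags equals the declarative scans
lemma compareLoopA_char (l : List (Option Int × Option Int)) : ∀ (w1 w2 : Bool),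
    compareLoopA l w1 w2 =
      if l.any (fun p => p.1.isSome && p.2.isSome && p.1 != p.2) then -1
      else if w1 && ! l.any (fun p => p.1 == none && p.2 != none) then 1
      else if w2 && ! l.any (fun p => p.2 == none && p.1 != none) then 0
      else -1 := by
  induction l with
  | nil => intro w1 w2; cases w1 <;> cases w2 <;> simp [compareLoopA]
  | cons hd tl ih =>
    intro w1 w2
    obtain ⟨e1, e2⟩ := hd
    rcases e1 with _ | a <;> rcases e2 with _ | b
    · simp [compareLoopA, bne]
      exact ih w1 w2
    · simp [compareLoopA, bne]
      exact ih false w2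
    · simp [compareLoopA, bne]
      exact ih w1 false
    · by_cases h : a = b
      · subst h
        simp [compareLoopA, bne]
        rw [ih]
        simp only [Bool.true_and, Bool.false_and, Bool.not_false, Bool.false_or,
          beq_self_eq_true, Bool.not_true, bne]
        rfl
      · simp [compareLoopA, bne, h]

-- ===== VERDICT (by name: the statement is the Claim_ definition above) =====
theorem compare_res_py_spec : Claim_equal_compare_res_py := by
  intro res1 res2 _
  unfold Spec_compare_res_py compare_res_py compare_res_py_alt
  rw [compareLoopA_char]
  simp only [Bool.true_and]
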